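-- pv_equiv track=rewrite | github.com/NotoriousBIF/BScMSLearning | methods.py | instrument_filter
-- ===== SOURCE A (Python) =====
-- def instrument_filter(instrument_aliases, dataset):
--     """takes aliases(dictionary) as x and the to be filtered dataset as y. returns a dictionary with the sorted
--     spectra as values and the instrument-type category as key"""
--     outputdict = {}
--     for category in instrument_aliases:
--         outputlist = []
--         aliasList = instrument_aliases.get(category)
--         for spectrum in dataset:
--             if spectrum.get("source_instrument") in aliasList:
--                 outputlist.append(spectrum)
--             else:
--                 pass
--         outputdict[category] = outputlist
--     return outputdict
-- ===== SOURCE B (Python) =====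
-- def instrument_filter(instrument_aliases, dataset):
--     """Inverted index alias -> categories, then one pass over the dataset
--     appending each spectrum to every matching category (O(A + D) instead of O(C*D*A))."""
--     output = {category: [] for category in instrument_aliases}
--     index = {}
--     for category, aliases in instrument_aliases.items():
--         for alias in dict.fromkeys(aliases):
--             index.setdefault(alias, []).append(category)
--     for spectrum in dataset:
--         for category in index.get(spectrum.get("source_instrument"), ()):
--             output[category].append(spectrum)
--     return output
-- ===== Notes on version B (the rewrite author's own statement) =====
-- stated objective: faster
-- what changed: Replaces A's per-category rescan of the whole dataset (membership test against each alias list) by an inverted index alias->categories built once, plus a single pass over the dataset appending each spectrum to every matching category.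
import Mathlib
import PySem

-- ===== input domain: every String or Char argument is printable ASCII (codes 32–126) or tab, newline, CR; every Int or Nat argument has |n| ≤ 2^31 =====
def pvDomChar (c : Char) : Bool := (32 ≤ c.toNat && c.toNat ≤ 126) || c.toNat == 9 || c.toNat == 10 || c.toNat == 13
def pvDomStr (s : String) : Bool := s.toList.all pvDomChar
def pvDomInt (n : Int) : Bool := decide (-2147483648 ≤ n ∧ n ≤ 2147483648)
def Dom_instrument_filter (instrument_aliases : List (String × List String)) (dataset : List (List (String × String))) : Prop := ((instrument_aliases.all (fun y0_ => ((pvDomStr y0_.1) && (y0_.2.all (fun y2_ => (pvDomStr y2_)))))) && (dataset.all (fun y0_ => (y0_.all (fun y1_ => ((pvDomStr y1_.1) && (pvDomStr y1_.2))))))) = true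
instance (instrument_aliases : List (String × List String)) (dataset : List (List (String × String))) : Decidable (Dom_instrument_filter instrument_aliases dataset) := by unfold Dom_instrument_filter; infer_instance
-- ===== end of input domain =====

-- B replaces A's category×dataset double scan by an inverted index al→categories and a single
-- dataset pass; equal output (same key order, same per-category spectrum order).

-- ===== PORT A =====
-- spectrum.get("source_instrument")
def pvInst (spectrum : List (String × String)) : Option String :=
  (PySem.Dict.ofList spectrum).get? "source_instrument"

-- "spectrum.get('source_instrument') in alList" (None equals no string, so a missing key never matches)
def pvMatch (spectrum : List (String × String)) (alList : List String) : Bool :=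
  match pvInst spectrum with
  | some s => alList.contains s
  | none => false

def instrument_filter (instrument_ales : List (String × List String)) (dataset : List (List (String × String))) : List (String × List (List (String × String))) :=
  let d := PySem.Dict.ofList instrument_ales
  (d.keys.foldl (fun (outputdict : PySem.Dict String (List (List (String × String)))) category =>
      -- alList = instrument_ales.get(category): always `some` for a key of d, `.getD []` is never used
      let alList := (d.get? category).getD []
      let outputlist := dataset.foldl (fun outputlist spectrum =>
        if pvMatch spectrum alList then outputlist ++ [spectrum] else outputlist) []
      outputdict.insert category outputlist)
    PySem.Dict.empty).items

-- ===== PORT B =====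
def instrument_filter_alt (instrument_ales : List (String × List String)) (dataset : List (List (String × String))) : List (String × List (List (String × String))) :=
  let d := PySem.Dict.ofList instrument_ales
  -- output = {category: [] for category in instrument_ales}
  let output0 : PySem.Dict String (List (List (String × String))) :=
    d.keys.foldl (fun od c => od.insert c []) PySem.Dict.empty
  -- index.setdefault(al, []).append(category) over dict.fromkeys(ales)
  let index : PySem.Dict String (List String) :=
    d.items.foldl (fun ix p =>
      (PySem.List.dedup p.2).foldl (fun ix al => ix.modify al [] (· ++ [p.1])) ix)
      PySem.Dict.empty
  (dataset.foldl (fun od spectrum =>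
      -- index.get(spectrum.get("source_instrument"), ())
      let cats := match pvInst spectrum with
        | some s => (index.get? s).getD []
        | none => []
      -- output[category].append(spectrum); category is always a key of od, so modify = append in place
      cats.foldl (fun od c => od.modify c [] (· ++ [spectrum])) od)
    output0).items

-- ===== PRECONDITION & SPEC =====
def Spec_instrument_filter (instrument_ales : List (String × List String)) (dataset : List (List (String × String))) (out : List (String × List (List (String × String)))) : Prop := out = instrument_filter_alt instrument_ales dataset
instance (instrument_ales : List (String × List String)) (dataset : List (List (String × String))) (out : List (String × List (List (String × String)))) : Decidable (Spec_instrument_filter instrument_ales dataset out) := by unfold Spec_instrument_filter; infer_instance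

-- ===== CLAIM (what is proved, stated in full; the proofs are below) =====
def Claim_equal_instrument_filter : Prop := ∀ (instrument_ales : List (String × List String)) (dataset : List (List (String × String))), Dom_instrument_filter instrument_ales dataset → Spec_instrument_filter instrument_ales dataset (instrument_filter instrument_ales dataset)

-- ===== LEMMAS AND PROOFS =====

-- the index built by B
def pvIdx (instrument_ales : List (String × List String)) : PySem.Dict String (List String) :=
  (PySem.Dict.ofList instrument_ales).items.foldl (fun ix p =>
    (PySem.List.dedup p.2).foldl (fun ix al => ix.modify al [] (· ++ [p.1])) ix)
    PySem.Dict.empty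

-- the category list B walks for one spectrum
def pvCats (instrument_ales : List (String × List String)) (spectrum : List (String × String)) : List String :=
  match pvInst spectrum with
  | some s => ((pvIdx instrument_ales).get? s).getD []
  | none => []

-- a nodup list filtered for equality with s
theorem pv_filter_beq_of_nodup {l : List String} (h : l.Nodup) (s : String) :
    l.filter (· == s) = if l.contains s then [s] else [] := by
  induction l with
  | nil => simp
  | cons a l ih =>
    rcases List.nodup_cons.mp h with ⟨ha, hl⟩
    rw [List.filter_cons]
    by_cases hs : a = s
    · subst hs
      have hnil : l.filter (· == a) = [] := List.filter_eq_nil_iff.mpr (fun b hb => by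
        simp only [beq_iff_eq]
        intro hba
        exact ha (hba ▸ hb))
      simp [hnil]
    · rw [ih hl]
      simp [hs, Ne.symm hs]

theorem pv_flatMap_ite_singleton {α β : Type} (l : List α) (p : α → Bool) (g : α → β) :
    (l.flatMap (fun x => if p x then [g x] else [])) = (l.filter p).map g := by
  induction l with
  | nil => rfl
  | cons a l ih => by_cases h : p a <;> simp [List.filter_cons, h, ih]

-- characterisation of the inverted index
theorem pvIdx_getD (ia : List (String × List String)) (s : String) :
    ((pvIdx ia).get? s).getD [] =
      ((PySem.Dict.ofList ia).items.filter (fun p => (PySem.List.dedup p.2).contains s)).map (·.1) := by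
  rw [← PySem.Dict.getD_eq_get?_getD]
  unfold pvIdx
  have hfold : ∀ (L : List (String × List String)) (ix : PySem.Dict String (List String)),
      L.foldl (fun ix p => (PySem.List.dedup p.2).foldl (fun ix al => ix.modify al [] (· ++ [p.1])) ix) ix
        = (L.flatMap (fun p => (PySem.List.dedup p.2).map (fun a => (a, p.1)))).foldl
            (fun ix q => ix.modify q.1 [] (· ++ [q.2])) ix := by
    intro L
    induction L with
    | nil => intro ix; rfl
    | cons p L ih =>
      intro ix
      simp only [List.foldl_cons, List.flatMap_cons, List.foldl_append, ih, List.foldl_map]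
  rw [hfold, PySem.Dict.getD_foldl_modify_append]
  rw [PySem.Dict.getD_of_not_contains _ _ (by simp [PySem.Dict.contains_empty])]
  simp only [List.nil_append, List.filter_flatMap, List.map_flatMap]
  have : ∀ p : String × List String,
      (((PySem.List.dedup p.2).map (fun a => (a, p.1))).filter (fun q => q.1 == s)).map (·.2)
        = if (PySem.List.dedup p.2).contains s then [p.1] else [] := by
    intro p
    rw [List.filter_map, List.map_map]
    simp only [Function.comp_def]
    rw [pv_filter_beq_of_nodup (PySem.List.nodup_dedup _) s]
    by_cases h2 : s ∈ p.2 <;> simp [h2]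
  rw [funext this]
  exact pv_flatMap_ite_singleton _ _ _

-- membership in B's category list = A's match test (for categories that are keys)
theorem pvCats_mem (ia : List (String × List String)) (sp : List (String × String))
    {c : String} (hc : c ∈ (PySem.Dict.ofList ia).keys) :
    (c ∈ pvCats ia sp) ↔ pvMatch sp (((PySem.Dict.ofList ia).get? c).getD []) = true := by
  set d := PySem.Dict.ofList ia with hd
  obtain ⟨v, hv⟩ : ∃ v, d.get? c = some v := by
    rcases h : d.get? c with _ | v
    · exact absurd ((PySem.Dict.get?_eq_none_iff_not_mem_keys d c).mp h) (by simpa using hc)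
    · exact ⟨v, rfl⟩
  unfold pvCats pvMatch
  rcases hs : pvInst sp with _ | s
  · simp [hs]
  · simp only [hs]
    rw [pvIdx_getD, hv]
    simp only [Option.getD_some, List.mem_map, List.mem_filter]
    constructor
    · rintro ⟨p, ⟨hp, hps⟩, hp1⟩
      have hpd : (c, p.2) ∈ d.items := by rw [← hp1]; exact hp
      have hg := PySem.Dict.get?_of_mem_items d hpd (PySem.Dict.nodup_keys_ofList ia)
      rw [hv] at hg
      have hpv : v = p.2 := by injection hg
      have hsp : s ∈ p.2 := by simpa [PySem.List.mem_dedup] using hps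
      rw [hpv]
      simpa using hsp
    · intro h
      refine ⟨(c, v), ⟨PySem.Dict.mem_items_of_get?_eq_some d hv, ?_⟩, rfl⟩
      simp only [PySem.List.mem_dedup] at *
      simpa [List.contains_iff_mem] using h

theorem pvCats_nodup (ia : List (String × List String)) (sp : List (String × String)) :
    (pvCats ia sp).Nodup := by
  unfold pvCats
  rcases hs : pvInst sp with _ | s
  · simp [hs]
  · simp only [hs]
    rw [pvIdx_getD]
    have hsub : (((PySem.Dict.ofList ia).items.filter
        (fun p => (PySem.List.dedup p.2).contains s)).map (·.1)).Sublist
        ((PySem.Dict.ofList ia).items.map (·.1)) :=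
      List.Sublist.map _ List.filter_sublist
    exact List.Nodup.sublist hsub (PySem.Dict.nodup_keys_ofList ia)

theorem pvCats_subset (ia : List (String × List String)) (sp : List (String × String))
    {c : String} (hc : c ∈ pvCats ia sp) : c ∈ (PySem.Dict.ofList ia).keys := by
  unfold pvCats at hc
  rcases hs : pvInst sp with _ | s
  · simp [hs] at hc
  · simp only [hs] at hc
    rw [pvIdx_getD] at hc
    rcases List.mem_map.mp hc with ⟨p, hp, hp1⟩
    exact hp1 ▸ List.mem_map_of_mem (List.mem_of_mem_filter hp)

-- one spectrum: getD after the inner modify loop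
theorem pv_inner_getD (sp : List (String × String)) :
    ∀ (cats : List String), cats.Nodup →
      ∀ (od : PySem.Dict String (List (List (String × String)))) (c : String),
      (cats.foldl (fun od c' => od.modify c' [] (· ++ [sp])) od).getD c []
        = od.getD c [] ++ (if c ∈ cats then [sp] else []) := by
  intro cats
  induction cats with
  | nil => intro _ od c; simp
  | cons a cats ih =>
    intro hnd od c
    rcases List.nodup_cons.mp hnd with ⟨ha, hcats⟩
    rw [List.foldl_cons, ih hcats, PySem.Dict.getD_modify]
    by_cases hca : c = a
    · subst hca
      simp [ha]
    · simp [hca]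

-- one spectrum: the inner modify loop keeps the key list
theorem pv_inner_keys (sp : List (String × String)) :
    ∀ (cats : List String) (od : PySem.Dict String (List (List (String × String)))),
      (∀ c ∈ cats, c ∈ od.keys) →
      (cats.foldl (fun od c' => od.modify c' [] (· ++ [sp])) od).keys = od.keys := by
  intro cats
  induction cats with
  | nil => intro od _; rfl
  | cons a cats ih =>
    intro od hsub
    rw [List.foldl_cons]
    have hkm : (od.modify a [] (· ++ [sp])).keys = od.keys := by
      rw [PySem.Dict.keys_modify, PySem.Dict.keys_insert_of_contains]
      exact (PySem.Dict.contains_iff_mem_keys od a).mpr (hsub a (List.mem_cons_self ..))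
    rw [ih _ (fun c hc => hkm ▸ hsub c (List.mem_cons_of_mem _ hc)), hkm]

-- the dataset pass: keys stay d.keys, and each category accumulates exactly A's filter
theorem pv_outer (ia : List (String × List String)) :
    ∀ (ds : List (List (String × String))) (od : PySem.Dict String (List (List (String × String)))),
      od.keys = (PySem.Dict.ofList ia).keys →
      (ds.foldl (fun od sp => (pvCats ia sp).foldl (fun od c => od.modify c [] (· ++ [sp])) od) od).keys
          = (PySem.Dict.ofList ia).keys
      ∧ ∀ c ∈ (PySem.Dict.ofList ia).keys,
        (ds.foldl (fun od sp => (pvCats ia sp).foldl (fun od c => od.modify c [] (· ++ [sp])) od) od).getD c []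
          = od.getD c [] ++ ds.filter (fun sp => pvMatch sp (((PySem.Dict.ofList ia).get? c).getD [])) := by
  intro ds
  induction ds with
  | nil => intro od hk; exact ⟨hk, fun c _ => by simp⟩
  | cons sp ds ih =>
    intro od hk
    have hsub : ∀ c ∈ pvCats ia sp, c ∈ od.keys := fun c hc => hk ▸ pvCats_subset ia sp hc
    have hk' : ((pvCats ia sp).foldl (fun od c => od.modify c [] (· ++ [sp])) od).keys
        = (PySem.Dict.ofList ia).keys := by rw [pv_inner_keys sp _ od hsub, hk]
    rcases ih _ hk' with ⟨h1, h2⟩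
    refine ⟨h1, fun c hc => ?_⟩
    rw [List.foldl_cons, h2 c hc, pv_inner_getD sp _ (pvCats_nodup ia sp) od c, List.filter_cons]
    by_cases hm : c ∈ pvCats ia sp
    · rw [if_pos hm, if_pos (by rwa [← pvCats_mem ia sp hc])]
      simp
    · rw [if_neg hm, if_neg (by rwa [← pvCats_mem ia sp hc])]
      simp

-- B's initial dict {c: [] for c in d.keys}
theorem pv_out0 (ia : List (String × List String)) :
    ((PySem.Dict.ofList ia).keys.foldl (fun od c => od.insert c []) (PySem.Dict.empty :
        PySem.Dict String (List (List (String × String))))).items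
      = (PySem.Dict.ofList ia).keys.map (fun c => (c, [])) := by
  have := PySem.Dict.items_foldl_insert_fresh (PySem.Dict.ofList ia).keys (fun c => c)
    (fun _ => ([] : List (List (String × String)))) PySem.Dict.empty
    (fun a _ => by simp [PySem.Dict.contains_empty])
    (by simp only [List.map_id']; exact PySem.Dict.nodup_keys_ofList ia)
  simpa using this

theorem pv_out0_keys (ia : List (String × List String)) :
    ((PySem.Dict.ofList ia).keys.foldl (fun od c => od.insert c []) (PySem.Dict.empty :
        PySem.Dict String (List (List (String × String))))).keys
      = (PySem.Dict.ofList ia).keys := by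
  show (((PySem.Dict.ofList ia).keys.foldl (fun od c => od.insert c []) PySem.Dict.empty).items.map (·.1))
      = _
  rw [pv_out0, List.map_map]
  simp [Function.comp_def]

theorem pv_out0_getD (ia : List (String × List String)) (c : String) :
    ((PySem.Dict.ofList ia).keys.foldl (fun od c => od.insert c []) (PySem.Dict.empty :
        PySem.Dict String (List (List (String × String))))).getD c [] = [] := by
  set od := (PySem.Dict.ofList ia).keys.foldl (fun od c => od.insert c []) (PySem.Dict.empty :
        PySem.Dict String (List (List (String × String)))) with hod
  by_cases hc : od.contains c
  · have hnd : od.keys.Nodup := by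
      rw [pv_out0_keys]; exact PySem.Dict.nodup_keys_ofList ia
    have hmem : c ∈ od.keys := (PySem.Dict.contains_iff_mem_keys od c).mp hc
    rw [pv_out0_keys] at hmem
    have : (c, ([] : List (List (String × String)))) ∈ od.items := by
      rw [hod, pv_out0]
      exact List.mem_map_of_mem hmem
    exact PySem.Dict.getD_of_mem_items od this hnd _
  · exact PySem.Dict.getD_of_not_contains od _ (by simpa using hc)

-- B's port, with its let-bound index expressed through pvCats (definitional)
theorem pv_alt_eq (ia : List (String × List String)) (ds : List (List (String × String))) :
    instrument_filter_alt ia ds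
      = (ds.foldl (fun od sp => (pvCats ia sp).foldl (fun od c => od.modify c [] (· ++ [sp])) od)
          ((PySem.Dict.ofList ia).keys.foldl (fun od c => od.insert c []) PySem.Dict.empty)).items := rfl

-- ===== VERDICT (by name: the statement is the Claim_ definition above) =====
theorem instrument_filter_spec : Claim_equal_instrument_filter := by
  intro ia ds _
  show instrument_filter ia ds = instrument_filter_alt ia ds
  rw [pv_alt_eq]
  unfold instrument_filter
  simp only []
  rw [PySem.Dict.items_foldl_insert_fresh (PySem.Dict.ofList ia).keys (fun c => c)
        (fun c => ds.foldl (fun ol sp =>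
          if pvMatch sp (((PySem.Dict.ofList ia).get? c).getD []) then ol ++ [sp] else ol) [])
        PySem.Dict.empty (fun a _ => by simp [PySem.Dict.contains_empty])
        (by simp only [List.map_id']; exact PySem.Dict.nodup_keys_ofList ia)]
  rcases pv_outer ia ds _ (pv_out0_keys ia) with ⟨hkeys, hgetD⟩
  rw [show (PySem.Dict.empty : PySem.Dict String (List (List (String × String)))).items = [] from rfl,
    List.nil_append]
  rw [PySem.Dict.items_eq_map_keys
        (ds.foldl (fun od sp => (pvCats ia sp).foldl (fun od c => od.modify c [] (· ++ [sp])) od)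
          ((PySem.Dict.ofList ia).keys.foldl (fun od c => od.insert c []) PySem.Dict.empty))
        (by rw [hkeys]; exact PySem.Dict.nodup_keys_ofList ia) [], hkeys]
  apply List.map_congr_left
  intro c hc
  rw [hgetD c hc, pv_out0_getD, List.nil_append,
    PySem.List.foldl_append_if (fun sp => pvMatch sp (((PySem.Dict.ofList ia).get? c).getD []))
      (fun sp => sp) ds []]
  simp
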